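-- pv_equiv track=rewrite | github.com/icysaintdx/OpenCode-Config-Manager | occm_core/cli_export.py | _extract_toml_section
-- ===== SOURCE A (Python) =====
-- from typing import Dict, List, Optional
--
-- def _extract_toml_section(content: str, section_name: str) -> Optional[str]:
--     """从 TOML 内容中提取指定段落"""
--     lines = content.split("\n")
--     result = []
--     in_section = False
--
--     for line in lines:
--         stripped = line.strip()
--         if stripped.startswith(f"[{section_name}"):
--             in_section = True
--             result.append(line)
--         elif in_section:
--             if stripped.startswith("[") and not stripped.startswith(
--                 f"[{section_name}"
--             ):
--                 break
--             result.append(line)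
--
--     return "\n".join(result) if result else None
-- ===== SOURCE B (Python) =====
-- def _extract_toml_section(content: str, section_name: str):
--     """Find-then-slice: locate the section header line, then the next foreign header."""
--     lines = content.split("\n")
--     prefix = f"[{section_name}"
--     start = next((i for i, l in enumerate(lines) if l.strip().startswith(prefix)), None)
--     if start is None:
--         return None
--     end = next((i for i in range(start + 1, len(lines))
--                 if lines[i].strip().startswith("[")
--                 and not lines[i].strip().startswith(prefix)),
--                len(lines))
--     return "\n".join(lines[start:end])
-- ===== Notes on version B (the rewrite author's own statement) =====
-- stated objective: alternative
-- what changed: Replaced the flag-driven interleaved append/break loop with two boundary searches (first header-matching line, then first foreign '[' line) and a single slice joined at the end.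
import Mathlib
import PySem

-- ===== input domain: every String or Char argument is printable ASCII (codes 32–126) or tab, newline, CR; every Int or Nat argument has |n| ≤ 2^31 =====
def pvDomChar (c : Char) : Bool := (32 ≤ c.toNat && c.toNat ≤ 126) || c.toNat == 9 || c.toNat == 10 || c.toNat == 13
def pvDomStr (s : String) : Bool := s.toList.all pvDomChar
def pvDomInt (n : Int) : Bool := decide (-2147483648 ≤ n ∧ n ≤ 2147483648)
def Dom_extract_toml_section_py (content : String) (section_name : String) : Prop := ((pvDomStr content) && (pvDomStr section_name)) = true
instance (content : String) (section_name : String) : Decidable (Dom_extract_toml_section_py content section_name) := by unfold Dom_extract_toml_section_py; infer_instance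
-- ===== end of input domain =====

-- B replaces A's flag-driven append/break loop by two boundary searches plus one slice (same cost, different decomposition).

-- ===== PORT A =====
-- the for-loop with its 'in_section' flag, 'result' accumulator and 'break'
def pvALoop (pref : String) : List String → Bool → List String → List String
  | [], _, res => res
  | l :: ls, in_section, res =>
    let stripped := PySem.Str.strip l
    if PySem.Str.startswith stripped pref then
      pvALoop pref ls true (res ++ [l])
    else if in_section then
      if PySem.Str.startswith stripped "[" && !PySem.Str.startswith stripped pref then
        res  -- break
      else
        pvALoop pref ls in_section (res ++ [l])
    else
      pvALoop pref ls in_section res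

def extract_toml_section_py (content : String) (section_name : String) : Option String :=
  let lines := (PySem.Str.split? content "\n").getD []
  let result := pvALoop ("[" ++ section_name) lines false []
  if result.isEmpty then none else some (PySem.Str.join "\n" result)

-- ===== PORT B =====
def extract_toml_section_py_alt (content : String) (section_name : String) : Option String :=
  let lines := (PySem.Str.split? content "\n").getD []
  let pref := "[" ++ section_name
  match lines.findIdx? (fun l => PySem.Str.startswith (PySem.Str.strip l) pref) with
  | none => none
  | some start =>
    let tail := lines.drop (start + 1)
    -- 'next((i for i in range(start+1, len(lines)) if …), len(lines))', kept relative to start+1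
    let stop := (tail.findIdx? (fun l =>
        PySem.Str.startswith (PySem.Str.strip l) "[" &&
        !PySem.Str.startswith (PySem.Str.strip l) pref)).getD tail.length
    some (PySem.Str.join "\n" ((lines.drop start).take (stop + 1)))

-- ===== PRECONDITION & SPEC =====
def Spec_extract_toml_section_py (content : String) (section_name : String) (out : Option String) : Prop := out = extract_toml_section_py_alt content section_name
instance (content : String) (section_name : String) (out : Option String) : Decidable (Spec_extract_toml_section_py content section_name out) := by unfold Spec_extract_toml_section_py; infer_instance

-- ===== CLAIM (what is proved, stated in full; the proofs are below) =====
def Claim_equal_extract_toml_section_py : Prop := ∀ (content : String) (section_name : String), Dom_extract_toml_section_py content section_name → Spec_extract_toml_section_py content section_name (extract_toml_section_py content section_name)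

-- ===== LEMMAS AND PROOFS =====

-- once in the section, A appends every line until the first 'foreign [' line
lemma pvALoop_in_section (pref : String) : ∀ (ls acc : List String),
    pvALoop pref ls true acc =
      acc ++ ls.takeWhile (fun l =>
        !(PySem.Str.startswith (PySem.Str.strip l) "[" &&
          !PySem.Str.startswith (PySem.Str.strip l) pref)) := by
  intro ls
  induction ls with
  | nil => intro acc; simp [pvALoop]
  | cons l ls ih =>
    intro acc
    by_cases hp : PySem.Str.startswith (PySem.Str.strip l) pref
    · simp at hp
      simp [pvALoop, hp, ih]
    · by_cases hb : PySem.Str.startswith (PySem.Str.strip l) "["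
      · simp at hp hb
        simp [pvALoop, hp, hb]
      · simp at hp hb
        simp [pvALoop, hp, hb, ih]

-- taking up to the first index where Q holds is takeWhile of ¬Q
lemma take_findIdx_eq_takeWhile {α : Type} (Q : α → Bool) : ∀ (xs : List α),
    xs.take (((xs.findIdx? Q).getD xs.length)) = xs.takeWhile (fun x => !Q x) := by
  intro xs
  induction xs with
  | nil => rfl
  | cons x xs ih =>
    by_cases hq : Q x
    · simp [List.findIdx?_cons, hq]
    · cases h : xs.findIdx? Q with
      | none => simp [List.findIdx?_cons, hq, ← ih]
      | some j => simp [List.findIdx?_cons, hq, ← ih]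

-- the whole list-level equivalence: A's loop result (wrapped) = B's find-then-slice
lemma pv_main (pref : String) : ∀ (lines : List String),
    (if (pvALoop pref lines false []).isEmpty then none
     else some (PySem.Str.join "\n" (pvALoop pref lines false []))) =
    (match lines.findIdx? (fun l => PySem.Str.startswith (PySem.Str.strip l) pref) with
     | none => none
     | some start =>
       let tail := lines.drop (start + 1)
       let stop := (tail.findIdx? (fun l =>
           PySem.Str.startswith (PySem.Str.strip l) "[" &&
           !PySem.Str.startswith (PySem.Str.strip l) pref)).getD tail.length
       some (PySem.Str.join "\n" ((lines.drop start).take (stop + 1)))) := by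
  intro lines
  induction lines with
  | nil => simp [pvALoop]
  | cons l ls ih =>
    by_cases hp : PySem.Str.startswith (PySem.Str.strip l) pref
    · -- the section starts here
      simp only [List.findIdx?_cons, hp, if_pos, pvALoop]
      rw [pvALoop_in_section]
      simp at hp
      simp [take_findIdx_eq_takeWhile]
    · -- skip this line on both sides
      simp only [List.findIdx?_cons, hp, if_neg, pvALoop, Bool.false_eq_true,
        not_false_eq_true]
      rw [ih]
      cases h : ls.findIdx? (fun l => PySem.Str.startswith (PySem.Str.strip l) pref) with
      | none => simp
      | some j => simp [List.drop_succ_cons]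

-- ===== VERDICT (by name: the statement is the Claim_ definition above) =====
theorem extract_toml_section_py_spec : Claim_equal_extract_toml_section_py := by
  intro content section_name _
  unfold Spec_extract_toml_section_py extract_toml_section_py extract_toml_section_py_alt
  exact pv_main ("[" ++ section_name) ((PySem.Str.split? content "\n").getD [])
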